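-- pv_equiv track=rewrite | github.com/Nue1711/practice_git | key-vending-copy1/app/payment/controller_pos.py | convertPriceToList
-- ===== SOURCE A (Python) =====
-- def convertPriceToList(price):
--     if "." in price:
--         if len(price) == price.index(".") + 2:
--             price += "0"
--     else:
--         price += ".00"
--
--     price = price.replace(".","")
--     price_list = []
--     for i in range(0,12):
--         if i >= len(price):
--             price_list.insert(0, '0'.encode("utf-8").hex())
--         else:
--             price_list.append(price[i].encode("utf-8").hex())
--     return price_list
-- ===== SOURCE B (Python) =====
-- def convertPriceToList(price):
--     if "." in price:
--         if len(price) == price.index(".") + 2: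
--             price += "0"
--     else:
--         price += ".00"
--
--     price = price.replace(".", "")
--     padded = price.rjust(12, "0")[:12]
--     return [c.encode("utf-8").hex() for c in padded]
-- ===== Notes on version B (the rewrite author's own statement) =====
-- stated objective: idiomatic
-- what changed: Replaces A's interleaved range(12) loop (front-insert for padding, append for digits) with a pad-then-map decomposition: left-pad the digit string to width 12 with rjust, truncate to 12, and hex-encode each character with a comprehension.
import Mathlib
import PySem

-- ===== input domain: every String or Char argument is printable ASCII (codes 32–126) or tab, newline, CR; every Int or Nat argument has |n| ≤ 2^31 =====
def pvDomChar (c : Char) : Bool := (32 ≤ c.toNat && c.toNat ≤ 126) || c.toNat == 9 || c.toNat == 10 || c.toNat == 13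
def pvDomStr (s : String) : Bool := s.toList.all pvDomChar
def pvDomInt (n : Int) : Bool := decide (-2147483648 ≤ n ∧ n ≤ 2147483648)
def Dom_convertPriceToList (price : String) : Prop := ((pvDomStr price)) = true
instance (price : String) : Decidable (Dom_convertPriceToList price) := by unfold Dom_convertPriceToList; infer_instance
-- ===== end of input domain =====

-- B replaces A's interleaved range(12) loop (front-insert padding / append digits) with
-- an idiomatic pad-then-map: rjust(12,'0')[:12] then hex-encode each char.

-- ===== PORT A =====

-- c.encode("utf-8").hex(): exact for single-byte (ASCII) characters, which is all of Dom.
def pvHexDigit (k : Nat) : Char := if k < 10 then Char.ofNat (48 + k) else Char.ofNat (87 + k)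
def pvHexByte (c : Char) : String := String.ofList [pvHexDigit (c.toNat / 16), pvHexDigit (c.toNat % 16)]

-- shared decimal-normalization prefix of both Pythons (the '.'/'.00' handling and the replace)
def pvNormalize (price : String) : List Char :=
  let p := price.toList
  let p := if PySem.Chars.isIn ['.'] p then
             (if (p.length : Int) = PySem.Chars.find p ['.'] + 2 then p ++ ['0'] else p)
           else p ++ ['.', '0', '0']
  PySem.Chars.replace p ['.'] []

-- the for-loop of A: i from 0 to 11; insert(0, hex('0')) when i >= len, else append hex(price[i])
def pvALoop (p : List Char) (i : Nat) (acc : List String) : List String :=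
  if i < 12 then
    if p.length ≤ i then pvALoop p (i + 1) (pvHexByte '0' :: acc)
    else pvALoop p (i + 1) (acc ++ [pvHexByte (p.getD i '0')])
  else acc
termination_by 12 - i

def convertPriceToList (price : String) : List String :=
  pvALoop (pvNormalize price) 0 []

-- ===== PORT B =====

-- price.rjust(12, "0") : left-pad with '0' to width 12 (hand port, exact)
def pvRjust (p : List Char) (w : Nat) (f : Char) : List Char :=
  List.replicate (w - p.length) f ++ p

def convertPriceToList_alt (price : String) : List String :=
  let padded := ((pvRjust (pvNormalize price) 12 '0').take 12)   -- [:12]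
  padded.map pvHexByte

-- ===== PRECONDITION & SPEC =====
def Spec_convertPriceToList (price : String) (out : List String) : Prop := out = convertPriceToList_alt price
instance (price : String) (out : List String) : Decidable (Spec_convertPriceToList price out) := by unfold Spec_convertPriceToList; infer_instance

-- ===== CLAIM (what is proved, stated in full; the proofs are below) =====
def Claim_equal_convertPriceToList : Prop := ∀ (price : String), Dom_convertPriceToList price → Spec_convertPriceToList price (convertPriceToList price)

-- ===== LEMMAS AND PROOFS =====

-- append phase when the string has at least 12 chars
theorem pvALoop_long (p : List Char) (hn : 12 ≤ p.length) :
    ∀ i acc, i ≤ 12 → pvALoop p i acc = acc ++ ((p.drop i).take (12 - i)).map pvHexByte := by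
  intro i
  induction' hd : 12 - i with k ih generalizing i
  · intro acc hi
    have : i = 12 := by omega
    subst this
    rw [pvALoop]
    simp
  · intro acc hi
    have hi12 : i < 12 := by omega
    have hin : i < p.length := by omega
    rw [pvALoop, if_pos hi12, if_neg (by omega)]
    rw [ih (i + 1) (by omega) _ (by omega)]
    rw [List.append_assoc]
    congr 1
    have hdrop : p.drop i = p[i] :: p.drop (i + 1) := (List.getElem_cons_drop hin).symm
    rw [hdrop, List.take_succ_cons, List.map_cons]
    simp [List.getD_eq_getElem?_getD, List.getElem?_eq_getElem hin]

-- padding phase: once i ≥ len, every remaining step front-inserts hex('0')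
theorem pvALoop_pad (p : List Char) :
    ∀ i acc, p.length ≤ i → i ≤ 12 →
      pvALoop p i acc = List.replicate (12 - i) (pvHexByte '0') ++ acc := by
  intro i
  induction' hd : 12 - i with k ih generalizing i
  · intro acc _ hi
    have : i = 12 := by omega
    subst this
    rw [pvALoop]
    simp
  · intro acc hn hi
    have hi12 : i < 12 := by omega
    rw [pvALoop, if_pos hi12, if_pos hn]
    rw [ih (i + 1) (by omega) _ (by omega) (by omega)]
    rw [List.replicate_succ', List.append_assoc]
    rfl

-- append phase when the string is short: steps i < len append the hex digits
theorem pvALoop_short (p : List Char) (hn : p.length < 12) :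
    ∀ i acc, i ≤ p.length →
      pvALoop p i acc = pvALoop p p.length (acc ++ ((p.drop i).map pvHexByte)) := by
  intro i
  induction' hd : p.length - i with k ih generalizing i
  · intro acc hi
    have : i = p.length := by omega
    subst this
    simp
  · intro acc hi
    have hin : i < p.length := by omega
    rw [pvALoop, if_pos (by omega), if_neg (by omega)]
    rw [ih (i + 1) (by omega) _ (by omega)]
    congr 1
    rw [List.append_assoc]
    congr 1
    have hdrop : p.drop i = p[i] :: p.drop (i + 1) := (List.getElem_cons_drop hin).symm
    rw [hdrop, List.map_cons]
    simp [List.getD_eq_getElem?_getD, List.getElem?_eq_getElem hin]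

theorem pvLoop_eq_padmap (p : List Char) :
    pvALoop p 0 [] = ((pvRjust p 12 '0').take 12).map pvHexByte := by
  by_cases h : 12 ≤ p.length
  · rw [pvALoop_long p h 0 [] (by omega)]
    unfold pvRjust
    rw [Nat.sub_eq_zero_of_le h]
    simp [List.map_take]
  · rw [not_le] at h
    rw [pvALoop_short p h 0 [] (by omega)]
    rw [pvALoop_pad p p.length _ le_rfl (by omega)]
    unfold pvRjust
    have hlen : (List.replicate (12 - p.length) '0' ++ p).length = 12 := by
      simp; omega
    rw [List.take_of_length_le (le_of_eq hlen)]
    simp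

-- ===== VERDICT (by name: the statement is the Claim_ definition above) =====
theorem convertPriceToList_spec : Claim_equal_convertPriceToList := by
  intro price _
  unfold Spec_convertPriceToList convertPriceToList convertPriceToList_alt
  exact pvLoop_eq_padmap (pvNormalize price)
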